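-- pv_equiv track=rewrite | github.com/AlejandroAlo/Pruebas-de-software-y-aseguramiento-de-la-calidad | A01700316_Numero_de_ActividadA4.2/P2/convert_numbers.py | convertir_a_hexadecimal
-- ===== SOURCE A (Python) =====
-- def convertir_a_hexadecimal(numero):
--     """Convierte un número a su representación hexadecimal con signo explícito."""
--     if numero == 0:
--         return '0'
--     signo = '-' if numero < 0 else ''
--     numero = abs(numero)
--     hexadecimal = ''
--     hex_chars = '0123456789ABCDEF'
--     while numero > 0:
--         hexadecimal = hex_chars[numero % 16] + hexadecimal
--         numero //= 16
--     return signo + hexadecimal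
-- ===== SOURCE B (Python) =====
-- def convertir_a_hexadecimal(numero):
--     """Convierte un numero a su representacion hexadecimal con signo explicito."""
--     if numero == 0:
--         return '0'
--     signo = '-' if numero < 0 else ''
--     return signo + format(abs(numero), 'X')
-- ===== Notes on version B (the rewrite author's own statement) =====
-- stated objective: idiomatic
-- what changed: The hand-written while-loop that extracts hex digits with repeated %16 and //16 and prepends characters is replaced by delegating the base-16 formatting of abs(numero) to format(..., 'X'); B keeps no loop state at all.
import Mathlib
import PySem

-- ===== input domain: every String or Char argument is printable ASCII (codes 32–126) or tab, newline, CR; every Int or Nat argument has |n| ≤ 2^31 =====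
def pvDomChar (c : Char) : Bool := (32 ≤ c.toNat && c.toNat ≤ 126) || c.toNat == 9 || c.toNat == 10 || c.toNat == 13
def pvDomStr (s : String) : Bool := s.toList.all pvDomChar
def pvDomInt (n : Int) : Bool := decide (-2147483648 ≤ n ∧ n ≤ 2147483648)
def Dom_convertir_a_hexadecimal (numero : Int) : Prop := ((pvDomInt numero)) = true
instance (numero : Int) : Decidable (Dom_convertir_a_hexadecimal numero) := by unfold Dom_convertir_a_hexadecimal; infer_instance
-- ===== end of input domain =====

-- B replaces A's manual digit-extraction while-loop by delegating base-16 formatting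
-- of abs(numero) to format(..., 'X') (more idiomatic); return values are proved equal.


-- ===== PORT A =====
-- hex_chars = '0123456789ABCDEF' as a character list
def pvHexChars : List Char := "0123456789ABCDEF".toList

-- the while-loop: while numero > 0: hexadecimal = hex_chars[numero % 16] + hexadecimal; numero //= 16
def pvALoop (numero : Int) (hexadecimal : List Char) : List Char :=
  if numero > 0 then
    pvALoop (PySem.Int.floordiv numero 16)
      (PySem.List.pyGetD pvHexChars (PySem.Int.mod numero 16) '0' :: hexadecimal)
  else hexadecimal
termination_by numero.toNat
decreasing_by
  rw [PySem.Int.floordiv_eq_ediv_of_pos (by omega)]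
  omega

def convertir_a_hexadecimal (numero : Int) : String :=
  if numero == 0 then "0"
  else
    let signo : String := if numero < 0 then "-" else ""
    let n := |numero|
    signo ++ String.ofList (pvALoop n [])

-- ===== PORT B =====
-- B-side: format(m, 'X') — base-16 uppercase formatting of a nonnegative integer
def pvHexDigit (k : Nat) : Char :=
  if k < 10 then Char.ofNat (48 + k) else Char.ofNat (55 + k)

def pvFormatX : Nat → List Char
  | 0 => []
  | n + 1 => pvFormatX ((n + 1) / 16) ++ [pvHexDigit ((n + 1) % 16)]
decreasing_by omega

def convertir_a_hexadecimal_alt (numero : Int) : String :=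
  if numero == 0 then "0"
  else
    let signo : String := if numero < 0 then "-" else ""
    signo ++ String.ofList (pvFormatX numero.natAbs)

-- ===== PRECONDITION & SPEC =====
def Spec_convertir_a_hexadecimal (numero : Int) (out : String) : Prop := out = convertir_a_hexadecimal_alt numero
instance (numero : Int) (out : String) : Decidable (Spec_convertir_a_hexadecimal numero out) := by unfold Spec_convertir_a_hexadecimal; infer_instance

-- ===== CLAIM (what is proved, stated in full; the proofs are below) =====
def Claim_equal_convertir_a_hexadecimal : Prop := ∀ (numero : Int), Dom_convertir_a_hexadecimal numero → Spec_convertir_a_hexadecimal numero (convertir_a_hexadecimal numero)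

-- ===== LEMMAS AND PROOFS =====

theorem pvFormatX_pos (n : Nat) (h : 0 < n) :
    pvFormatX n = pvFormatX (n / 16) ++ [pvHexDigit (n % 16)] := by
  cases n with
  | zero => omega
  | succ m => rw [pvFormatX]

theorem pvHexChars_getD (d : Nat) (hd : d < 16) :
    pvHexChars.getD d '0' = pvHexDigit d := by
  interval_cases d <;> rfl

theorem pvALoop_eq (n : Nat) (acc : List Char) :
    pvALoop (n : Int) acc = pvFormatX n ++ acc := by
  induction n using Nat.strong_induction_on generalizing acc with
  | _ n ih =>
    rw [pvALoop]
    by_cases h : 0 < n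
    · have hfd : PySem.Int.floordiv (n : Int) 16 = ((n / 16 : Nat) : Int) := by
        exact_mod_cast PySem.Int.floordiv_natCast n 16
      have hmd : PySem.Int.mod (n : Int) 16 = ((n % 16 : Nat) : Int) := by
        exact_mod_cast PySem.Int.mod_natCast n 16
      rw [if_pos (by exact_mod_cast h), hfd, hmd, PySem.List.pyGetD_natCast,
        pvHexChars_getD _ (Nat.mod_lt _ (by norm_num)),
        ih (n / 16) (Nat.div_lt_self h (by norm_num)),
        pvFormatX_pos n h, List.append_assoc]
      rfl
    · have hn : n = 0 := by omega
      subst hn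
      simp [pvFormatX]

theorem convertir_a_hexadecimal_eq (numero : Int) :
    convertir_a_hexadecimal numero = convertir_a_hexadecimal_alt numero := by
  by_cases h0 : numero = 0
  · subst h0; rfl
  · have hb : (numero == 0) = false := by simp [h0]
    unfold convertir_a_hexadecimal convertir_a_hexadecimal_alt
    rw [hb]
    simp only [Bool.false_eq_true, if_false]
    rw [Int.abs_eq_natAbs, pvALoop_eq, List.append_nil]

-- ===== VERDICT (by name: the statement is the Claim_ definition above) =====
theorem convertir_a_hexadecimal_spec : Claim_equal_convertir_a_hexadecimal := by
  intro numero _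
  unfold Spec_convertir_a_hexadecimal
  exact convertir_a_hexadecimal_eq numero
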